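-- pv_equiv track=rewrite | github.com/CarlAGNicholson/greening-the-spark | gts_lib/gts_maths.py | vmaxabs2DArray
-- ===== SOURCE A (Python) =====
-- import copy
--
-- def vmaxabs2DArray(array1):
--     '''Gets max absolute value of each column.'''
--     vmax = copy.copy(array1[0])
--     for i in range(len(vmax)):
--         vmax[i] = 0
--     for row in array1:
--         for i in range(len(row)):
--             if abs(row[i]) > abs(vmax[i]):
--                 vmax[i] = abs(row[i])
--     return vmax
-- ===== SOURCE B (Python) =====
-- def vmaxabs2DArray(array1):
--     '''Gets max absolute value of each column.'''
--     width = max(len(row) for row in array1)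
--     return [max(abs(row[j]) for row in array1 if j < len(row))
--             for j in range(width)]
-- ===== Notes on version B (the rewrite author's own statement) =====
-- stated objective: simpler
-- what changed: Replaces A's zero-initialised running vector with element-wise in-place comparisons by a column-wise comprehension: one max of absolute values per column index over the rows that have that column.
import Mathlib
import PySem

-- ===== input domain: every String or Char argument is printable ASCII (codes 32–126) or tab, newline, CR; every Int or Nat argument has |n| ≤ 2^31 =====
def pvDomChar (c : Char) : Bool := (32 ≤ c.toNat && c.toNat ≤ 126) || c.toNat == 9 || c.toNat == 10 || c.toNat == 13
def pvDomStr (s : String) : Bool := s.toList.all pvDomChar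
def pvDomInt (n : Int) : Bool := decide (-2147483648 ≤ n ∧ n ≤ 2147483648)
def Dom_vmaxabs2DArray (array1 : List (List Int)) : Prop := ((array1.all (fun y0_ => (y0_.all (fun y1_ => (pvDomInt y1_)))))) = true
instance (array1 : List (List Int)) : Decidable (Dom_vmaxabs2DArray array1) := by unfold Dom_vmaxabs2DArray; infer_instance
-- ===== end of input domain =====

-- B replaces A's zeroed running vector updated in place with a column-wise
-- comprehension (one max of absolute values per column index): simpler, same cost.

-- ===== PORT A =====
def vmaxabs2DArray (array1 : List (List Int)) : List Int :=
  -- vmax = copy.copy(array1[0]); then zeroed; then element-wise updates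
  let vmax0 := array1.headD []
  let vmax1 := (List.range vmax0.length).foldl (fun v i => v.set i 0) vmax0
  array1.foldl (fun vmax row =>
    (List.range row.length).foldl (fun v i =>
      if |row.getD i 0| > |v.getD i 0| then v.set i |row.getD i 0| else v) vmax) vmax1

-- ===== PORT B =====
def vmaxabs2DArray_alt (array1 : List (List Int)) : List Int :=
  -- width = max(len(row) for row in array1); max() on [] raises ValueError (outside Pre_)
  let width := match array1.map (fun row => row.length) with
    | [] => 0
    | x :: xs => xs.foldl max x
  (List.range width).map (fun j =>
    -- max(abs(row[j]) for row in array1 if j < len(row)); empty only outside Pre_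
    match (array1.filter (fun row => decide (j < row.length))).map (fun row => |row.getD j 0|) with
    | [] => 0
    | x :: xs => xs.foldl max x)

-- ===== PRECONDITION & SPEC =====
-- Pre_ excludes exactly the inputs where A raises IndexError: the empty list,
-- and inputs with a row longer than the first row.
def Pre_vmaxabs2DArray (array1 : List (List Int)) : Prop :=
  array1 ≠ [] ∧ ∀ row ∈ array1, row.length ≤ (array1.headD []).length
instance (array1 : List (List Int)) : Decidable (Pre_vmaxabs2DArray array1) := by
  unfold Pre_vmaxabs2DArray; infer_instance
def pvWitness_vmaxabs2DArray : List (List Int) := [[1, -2], [3, 4]]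
def Spec_vmaxabs2DArray (array1 : List (List Int)) (out : List Int) : Prop := out = vmaxabs2DArray_alt array1
instance (array1 : List (List Int)) (out : List Int) : Decidable (Spec_vmaxabs2DArray array1 out) := by unfold Spec_vmaxabs2DArray; infer_instance

-- ===== CLAIM (what is proved, stated in full; the proofs are below) =====
def Claim_equal_vmaxabs2DArray : Prop := ∀ (array1 : List (List Int)), Dom_vmaxabs2DArray array1 → Pre_vmaxabs2DArray array1 → Spec_vmaxabs2DArray array1 (vmaxabs2DArray array1)

-- ===== LEMMAS AND PROOFS =====

def pvComb (a b : Int) : Int := if |b| > |a| then |b| else a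

lemma pv_zero_fold : ∀ (n : Nat) (v : List Int), n ≤ v.length →
    (List.range n).foldl (fun v i => v.set i (0 : Int)) v
      = List.replicate n 0 ++ v.drop n := by
  intro n
  induction n with
  | zero => intro v _; simp
  | succ n ih =>
    intro v hn
    have hnv : n < v.length := by omega
    rw [List.range_succ, List.foldl_append, ih v (by omega)]
    simp only [List.foldl_cons, List.foldl_nil]
    rw [List.drop_eq_getElem_cons hnv]
    rw [List.set_append_right _ _ (by simp)]
    have hrl : (List.replicate n (0:Int)).length = n := by simp
    rw [hrl, Nat.sub_self, List.set_cons_zero, List.replicate_succ' (n := n)]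
    simp

lemma pv_inner_fold (row : List Int) : ∀ (n : Nat) (v : List Int),
    n ≤ v.length → n ≤ row.length →
    (List.range n).foldl (fun v i =>
        if |row.getD i 0| > |v.getD i 0| then v.set i |row.getD i 0| else v) v
      = List.zipWith pvComb (v.take n) (row.take n) ++ v.drop n := by
  intro n
  induction n with
  | zero => intro v _ _; simp
  | succ n ih =>
    intro v hv hr
    have hnv : n < v.length := by omega
    have hnr : n < row.length := by omega
    rw [List.range_succ, List.foldl_append, ih v (by omega) (by omega)]
    simp only [List.foldl_cons, List.foldl_nil]
    have hlen : (List.zipWith pvComb (v.take n) (row.take n)).length = n := by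
      simp [Nat.min_eq_left (le_of_lt hnv), Nat.min_eq_left (le_of_lt hnr)]
    have hmid : (List.zipWith pvComb (v.take n) (row.take n) ++ v.drop n).getD n 0
        = v.getD n 0 := by
      rw [List.drop_eq_getElem_cons hnv]
      rw [List.getD, List.getElem?_append_right (by omega)]
      simp [hlen, List.getD, List.getElem?_eq_getElem hnv]
    have htake : ∀ (l : List Int), n < l.length → l.take (n + 1) = l.take n ++ [l.getD n 0] := by
      intro l hl
      rw [List.take_add_one]
      simp [List.getD, List.getElem?_eq_getElem hl]
    have hgdv : v.getD n 0 = v[n] := by simp [List.getD, List.getElem?_eq_getElem hnv]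
    have hset : ∀ x : Int, (List.zipWith pvComb (v.take n) (row.take n) ++ v.drop n).set n x
        = List.zipWith pvComb (v.take n) (row.take n) ++ x :: v.drop (n + 1) := by
      intro x
      rw [List.set_append_right _ _ (by omega), hlen, Nat.sub_self,
        List.drop_eq_getElem_cons hnv, List.set_cons_zero]
    rw [htake v hnv, htake row hnr,
      List.zipWith_append (by simp [Nat.min_eq_left (le_of_lt hnv), Nat.min_eq_left (le_of_lt hnr)])]
    rw [hmid]
    have hz : List.zipWith pvComb [v.getD n 0] [row.getD n 0]
        = [pvComb (v.getD n 0) (row.getD n 0)] := rfl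
    rw [hz]
    by_cases h : |row.getD n 0| > |v.getD n 0|
    · have hc : pvComb (v.getD n 0) (row.getD n 0) = |row.getD n 0| := by
        unfold pvComb; rw [if_pos h]
      rw [if_pos h, hset, hc, List.append_assoc]
      rfl
    · have hc : pvComb (v.getD n 0) (row.getD n 0) = v.getD n 0 := by
        unfold pvComb; rw [if_neg h]
      rw [if_neg h, hc, List.drop_eq_getElem_cons hnv, hgdv, List.append_assoc]
      rfl

lemma pv_gA_len {v row : List Int} {L : Nat} (hv : v.length = L) (hr : row.length ≤ L) :
    (List.zipWith pvComb (v.take row.length) row ++ v.drop row.length).length = L := by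
  simp; omega

lemma pv_outerA (L : Nat) : ∀ (rows : List (List Int)) (v : List Int),
    v.length = L → (∀ r ∈ rows, r.length ≤ L) →
    rows.foldl (fun vmax row =>
        (List.range row.length).foldl (fun v i =>
          if |row.getD i 0| > |v.getD i 0| then v.set i |row.getD i 0| else v) vmax) v
      = rows.foldl (fun v row =>
          List.zipWith pvComb (v.take row.length) row ++ v.drop row.length) v := by
  intro rows
  induction rows with
  | nil => intro v _ _; rfl
  | cons r rs ih =>
    intro v hv hall
    have hr : r.length ≤ L := hall r (by simp)
    simp only [List.foldl_cons]
    rw [pv_inner_fold r r.length v (by omega) le_rfl, List.take_length]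
    exact ih _ (pv_gA_len hv hr) (fun x hx => hall x (by simp [hx]))

lemma pv_outer_len (L : Nat) : ∀ (rows : List (List Int)) (v : List Int),
    v.length = L → (∀ r ∈ rows, r.length ≤ L) →
    (rows.foldl (fun v row =>
        List.zipWith pvComb (v.take row.length) row ++ v.drop row.length) v).length = L := by
  intro rows
  induction rows with
  | nil => intro v hv _; simpa using hv
  | cons r rs ih =>
    intro v hv hall
    simp only [List.foldl_cons]
    exact ih _ (pv_gA_len hv (hall r (by simp))) (fun x hx => hall x (by simp [hx]))

lemma pv_step_getD (v row : List Int) (j : Nat) (hn : row.length ≤ v.length)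
    (hj : j < v.length) :
    (List.zipWith pvComb (v.take row.length) row ++ v.drop row.length).getD j 0
      = if j < row.length then pvComb (v.getD j 0) (row.getD j 0) else v.getD j 0 := by
  have hlen : (List.zipWith pvComb (v.take row.length) row).length = row.length := by
    simp; omega
  by_cases hjn : j < row.length
  · rw [if_pos hjn]
    rw [List.getD, List.getElem?_append_left (by omega)]
    have hjz : j < (List.zipWith pvComb (v.take row.length) row).length := by omega
    rw [List.getElem?_eq_getElem hjz]
    rw [List.getElem_zipWith]
    have h1 : (v.take row.length)[j]'(by simp; omega) = v[j]'hj := List.getElem_take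
    simp [h1, List.getD, List.getElem?_eq_getElem hj,
      List.getElem?_eq_getElem (show j < row.length from hjn)]
  · rw [if_neg hjn]
    rw [List.getD, List.getElem?_append_right (by omega), hlen]
    rw [List.getElem?_drop]
    have : row.length + (j - row.length) = j := by omega
    rw [this]
    simp [List.getD]

lemma pv_outer_getD (L j : Nat) (hj : j < L) : ∀ (rows : List (List Int)) (v : List Int),
    v.length = L → (∀ r ∈ rows, r.length ≤ L) →
    (rows.foldl (fun v row =>
        List.zipWith pvComb (v.take row.length) row ++ v.drop row.length) v).getD j 0
      = rows.foldl (fun a row =>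
          if j < row.length then pvComb a (row.getD j 0) else a) (v.getD j 0) := by
  intro rows
  induction rows with
  | nil => intro v _ _; rfl
  | cons r rs ih =>
    intro v hv hall
    have hr : r.length ≤ L := hall r (by simp)
    simp only [List.foldl_cons]
    rw [ih _ (pv_gA_len hv hr) (fun x hx => hall x (by simp [hx]))]
    rw [pv_step_getD v r j (by omega) (by omega)]

lemma pv_max_fold (L : Nat) : ∀ (rs : List (List Int)), (∀ r ∈ rs, r.length ≤ L) →
    (rs.map (fun row => row.length)).foldl max L = L := by
  intro rs
  induction rs with
  | nil => intro _; rfl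
  | cons r rs ih =>
    intro hall
    simp only [List.map_cons, List.foldl_cons,
      Nat.max_eq_left (hall r (by simp))]
    exact ih (fun x hx => hall x (by simp [hx]))

lemma pv_comb_nonneg (a b : Int) (ha : 0 ≤ a) : pvComb a b = max a |b| := by
  unfold pvComb
  rw [abs_of_nonneg ha]
  by_cases h : |b| > a
  · rw [if_pos h]; omega
  · rw [if_neg h]; omega

lemma pv_fold_comb_max (j : Nat) : ∀ (rs : List (List Int)) (a : Int), 0 ≤ a →
    rs.foldl (fun a row => if j < row.length then pvComb a (row.getD j 0) else a) a
      = rs.foldl (fun a row => if j < row.length then max a |row.getD j 0| else a) a := by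
  intro rs
  induction rs with
  | nil => intro a _; rfl
  | cons r rs ih =>
    intro a ha
    simp only [List.foldl_cons]
    by_cases h : j < r.length
    · rw [if_pos h, if_pos h, pv_comb_nonneg _ _ ha]
      exact ih _ (le_trans ha (le_max_left _ _))
    · rw [if_neg h, if_neg h]
      exact ih _ ha

-- ===== VERDICT (by name: the statement is the Claim_ definition above) =====
theorem vmaxabs2DArray_spec : Claim_equal_vmaxabs2DArray := by
  intro array1 _ hpre
  obtain ⟨hne, hall⟩ := hpre
  obtain ⟨r0, rs, rfl⟩ : ∃ r0 rs, array1 = r0 :: rs := by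
    cases array1 with
    | nil => exact absurd rfl hne
    | cons r0 rs => exact ⟨r0, rs, rfl⟩
  set L := r0.length with hL
  have hall' : ∀ r ∈ r0 :: rs, r.length ≤ L := by
    intro r hr; simpa using hall r hr
  show vmaxabs2DArray (r0 :: rs) = vmaxabs2DArray_alt (r0 :: rs)
  unfold vmaxabs2DArray vmaxabs2DArray_alt
  simp only [List.headD_cons, List.map_cons]
  rw [pv_zero_fold L r0 le_rfl, List.drop_of_length_le le_rfl, List.append_nil]
  rw [pv_outerA L _ _ (by simp) hall']
  rw [pv_max_fold L rs (fun x hx => hall' x (by simp [hx]))]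
  apply List.ext_getElem
  · rw [pv_outer_len L _ _ (by simp) hall']; simp
  · intro j hj1 hj2
    have hjL : j < L := by simpa using hj2
    have hgd : ∀ (l : List Int) (h : j < l.length), l[j] = l.getD j 0 := by
      intro l h; simp [List.getD, List.getElem?_eq_getElem h]
    rw [hgd _ hj1]
    rw [pv_outer_getD L j hjL _ _ (by simp) hall']
    have hrep : (List.replicate L (0 : Int)).getD j 0 = 0 := by
      simp [List.getD, List.getElem?_eq_getElem (by simpa using hjL :
        j < (List.replicate L (0 : Int)).length)]
    rw [hrep]
    simp only [List.getElem_map, List.getElem_range]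
    rw [List.filter_cons_of_pos (by simpa using hjL)]
    simp only [List.map_cons, List.foldl_cons]
    have h0 : pvComb 0 (r0.getD j 0) = |r0.getD j 0| := by
      unfold pvComb
      by_cases h : |r0.getD j 0| > |(0 : Int)|
      · rw [if_pos h]
      · rw [if_neg h]
        rw [abs_zero] at h
        have h2 := abs_nonneg (r0.getD j 0)
        omega
    rw [h0, if_pos (show j < r0.length from hjL), pv_fold_comb_max j rs _ (abs_nonneg _)]
    rw [List.foldl_map, List.foldl_filter]
    simp
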